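-- pv_equiv track=rewrite | github.com/ludia8888/SPICE-Harvester | backend/shared/tools/error_taxonomy_audit.py | _normalize_route_path
-- ===== SOURCE A (Python) =====
-- from typing import Dict, Iterable, List, Optional, Tuple
--
-- def _normalize_route_path(*parts: str) -> str:
--     tokens: List[str] = []
--     for part in parts:
--         for token in str(part or "").split("/"):
--             token = token.strip()
--             if token:
--                 tokens.append(token)
--     return "/" + "/".join(tokens) if tokens else "/"
-- ===== SOURCE B (Python) =====
-- def _normalize_route_path(*parts):
--     s = "/".join(str(p or "") for p in parts)
--     tokens = []
--     cur = []
--     for ch in s + "/":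
--         if ch == "/":
--             t = "".join(cur).strip()
--             if t:
--                 tokens.append(t)
--             cur = []
--         else:
--             cur.append(ch)
--     return "/" + "/".join(tokens) if tokens else "/"
-- ===== Notes on version B (the rewrite author's own statement) =====
-- stated objective: alternative
-- what changed: B first flattens all parts into one slash-joined string and then tokenizes it in a single character-level scan with a current-token buffer, instead of A's nested per-part split/strip/append loops.
import Mathlib
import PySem

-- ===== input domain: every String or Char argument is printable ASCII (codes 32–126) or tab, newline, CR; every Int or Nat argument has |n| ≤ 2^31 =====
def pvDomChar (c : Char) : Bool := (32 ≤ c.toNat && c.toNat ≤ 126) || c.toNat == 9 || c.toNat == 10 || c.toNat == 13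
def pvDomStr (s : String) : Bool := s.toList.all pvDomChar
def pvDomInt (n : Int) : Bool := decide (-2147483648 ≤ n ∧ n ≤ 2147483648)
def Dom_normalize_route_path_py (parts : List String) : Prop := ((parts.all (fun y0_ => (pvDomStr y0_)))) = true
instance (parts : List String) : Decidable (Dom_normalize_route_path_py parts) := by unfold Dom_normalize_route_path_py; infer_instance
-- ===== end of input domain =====

-- B flattens everything into one slash-joined string first and tokenizes it in a single
-- character-level scan with a current-token buffer, instead of A's nested split/append loops
-- (alternative decomposition, same cost).

-- Both Pythons are called with the list as the single vararg, so `str(part or "")` is Python's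
-- repr of the whole list ("" for the empty list). This shared helper is that repr, exact on the
-- ASCII+tab/newline/CR domain (no \xhh escapes needed there).
def pyReprChar (q : Char) (c : Char) : List Char :=
  if c = '\\' then ['\\', '\\']
  else if c = q then ['\\', q]
  else if c = Char.ofNat 9 then ['\\', 't']
  else if c = Char.ofNat 10 then ['\\', 'n']
  else if c = Char.ofNat 13 then ['\\', 'r']
  else [c]

def pyReprStr (s : List Char) : List Char :=
  let q : Char := if s.contains '\'' && !(s.contains '"') then '"' else '\''
  q :: s.flatMap (pyReprChar q) ++ [q]

def pyStrOfList (parts : List String) : List Char :=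
  if parts = [] then []  -- `[] or ""` is "" (empty list is falsy)
  else '[' :: PySem.Chars.join [',', ' '] (parts.map (fun p => pyReprStr p.toList)) ++ [']']

-- ===== PORT A =====
-- for part in parts: for token in str(part or "").split("/"): token = token.strip(); if token: tokens.append(token)
-- (the varargs tuple is the 1-tuple holding the list argument, so the outer loop runs over [pyStrOfList parts])
def normalize_route_path_py (parts : List String) : String :=
  let tokens : List (List Char) :=
    [pyStrOfList parts].foldl (fun toks part =>
      (PySem.Chars.splitOn part ['/']).foldl (fun toks tok =>
        let t := PySem.Chars.strip tok
        if t ≠ [] then toks ++ [t] else toks) toks) []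
  if tokens ≠ [] then String.ofList ('/' :: PySem.Chars.join ['/'] tokens) else "/"

-- ===== PORT B =====
-- s = "/".join(str(p or "") for p in parts); then one pass over s + "/" with a (tokens, cur) state
def normalize_route_path_py_alt (parts : List String) : String :=
  let s : List Char := PySem.Chars.join ['/'] [pyStrOfList parts]
  let st : List (List Char) × List Char :=
    (s ++ ['/']).foldl (fun st ch =>
      if ch = '/' then
        let t := PySem.Chars.strip st.2
        (if t ≠ [] then st.1 ++ [t] else st.1, [])
      else (st.1, st.2 ++ [ch])) ([], [])
  let tokens := st.1
  if tokens ≠ [] then String.ofList ('/' :: PySem.Chars.join ['/'] tokens) else "/"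

-- ===== PRECONDITION & SPEC =====
def Spec_normalize_route_path_py (parts : List String) (out : String) : Prop := out = normalize_route_path_py_alt parts
instance (parts : List String) (out : String) : Decidable (Spec_normalize_route_path_py parts out) := by unfold Spec_normalize_route_path_py; infer_instance

-- ===== CLAIM (what is proved, stated in full; the proofs are below) =====
def Claim_equal_normalize_route_path_py : Prop := ∀ (parts : List String), Dom_normalize_route_path_py parts → Spec_normalize_route_path_py parts (normalize_route_path_py parts)

-- ===== LEMMAS AND PROOFS =====

-- simple recursive characterisation of splitting on the single character '/'
def splitAux (pre : List Char) : List Char → List (List Char)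
  | [] => [pre]
  | c :: rest => if c = '/' then pre :: splitAux [] rest else splitAux (pre ++ [c]) rest

theorem splitOn_go_spec (fuel : Nat) (l cur : List Char) (acc : List (List Char))
    (h : l.length < fuel) :
    PySem.Chars.splitOn.go ['/'] fuel l cur acc = acc.reverse ++ splitAux cur.reverse l := by
  induction fuel generalizing l cur acc with
  | zero => omega
  | succ n ih =>
    cases l with
    | nil => simp [PySem.Chars.splitOn.go, splitAux]
    | cons c rest =>
      rw [PySem.Chars.splitOn.go]
      by_cases hc : c = '/'
      · subst hc
        simp only [List.length_cons] at h
        norm_num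
        rw [ih rest [] (cur.reverse :: acc) (by omega)]
        simp [splitAux]
      · have : List.isPrefixOf ['/'] (c :: rest) = false := by
          simp [List.isPrefixOf]; intro hh; exact absurd hh.symm hc
        simp only [this, Bool.false_eq_true, if_false]
        rw [ih rest (c :: cur) acc (by simp at h ⊢; omega)]
        simp [splitAux, hc]

theorem splitOn_eq_splitAux (s : List Char) :
    PySem.Chars.splitOn s ['/'] = splitAux [] s := by
  rw [PySem.Chars.splitOn, splitOn_go_spec (s.length + 1) s [] [] (by omega)]; simp

-- the token list both programs extract from a string
def toksOf (cs : List Char) : List (List Char) :=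
  ((splitAux [] cs).map PySem.Chars.strip).filter (· ≠ [])

-- A's inner loop appends exactly the stripped nonempty tokens
theorem inner_loop_eq (p : List Char) (toks : List (List Char)) :
    (PySem.Chars.splitOn p ['/']).foldl (fun toks tok =>
        let t := PySem.Chars.strip tok
        if t ≠ [] then toks ++ [t] else toks) toks
      = toks ++ toksOf p := by
  have hfun : (fun (toks : List (List Char)) tok =>
        let t := PySem.Chars.strip tok
        if t ≠ [] then toks ++ [t] else toks)
      = (fun toks tok =>
        if (fun tok => decide (PySem.Chars.strip tok ≠ [])) tok = true
        then toks ++ [PySem.Chars.strip tok] else toks) := by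
    funext toks tok; by_cases h : PySem.Chars.strip tok = [] <;> simp [h]
  rw [hfun, PySem.List.foldl_append_if, splitOn_eq_splitAux, toksOf, List.filter_map]
  rfl

-- B's character scan over l ++ ['/'] emits exactly the stripped nonempty tokens of splitAux cur l
theorem scan_eq (l : List Char) (toks : List (List Char)) (cur : List Char) :
    (l ++ ['/']).foldl (fun st ch =>
        if ch = '/' then
          let t := PySem.Chars.strip st.2
          (if t ≠ [] then st.1 ++ [t] else st.1, ([] : List Char))
        else (st.1, st.2 ++ [ch])) (toks, cur)
      = (toks ++ ((splitAux cur l).map PySem.Chars.strip).filter (· ≠ []), []) := by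
  induction l generalizing toks cur with
  | nil =>
    by_cases h : PySem.Chars.strip cur = [] <;>
      simp [splitAux, h]
  | cons c rest ih =>
    by_cases hc : c = '/'
    · subst hc
      rw [List.cons_append, List.foldl_cons]
      rw [ih]
      by_cases h : PySem.Chars.strip cur = [] <;>
        simp [splitAux, h]
    · rw [List.cons_append, List.foldl_cons]
      simp only [if_neg hc]
      rw [ih]
      simp [splitAux, hc]

-- ===== VERDICT (by name: the statement is the Claim_ definition above) =====
theorem normalize_route_path_py_spec : Claim_equal_normalize_route_path_py := by
  intro parts _
  show normalize_route_path_py parts = normalize_route_path_py_alt parts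
  unfold normalize_route_path_py normalize_route_path_py_alt
  simp only [List.foldl_cons, List.foldl_nil, inner_loop_eq, List.nil_append,
    PySem.Chars.join, List.intercalate, scan_eq]
  have h1 : (List.intersperse ['/'] [pyStrOfList parts]).flatten = pyStrOfList parts := by
    simp [List.intersperse]
  rw [h1]; rfl
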